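-- pv_equiv track=rewrite | github.com/mhr1812/DSA | 1716-calculate-money-in-leetcode-bank/1716-calculate-money-in-leetcode-bank.py | totalMoney
-- ===== SOURCE A (Python) =====
-- def totalMoney(n: int) -> int:
--     k = n//7
--     m = n%7
--     sm = 0
--     for i in range(k+1,k+m+1):
--         sm+=i
--     st = 1
--     end = 7
--     while st<=k:
--         for i in range(st,end+1):
--             sm+=i
--         st+=1
--         end+=1
--     return sm
-- ===== SOURCE B (Python) =====
-- def totalMoney(n: int) -> int:
--     k, m = divmod(n, 7)
--     partial = m * k + m * (m + 1) // 2
--     full = 7 * k * (k + 1) // 2 + 21 * k if k > 0 else 0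
--     return partial + full
-- ===== Notes on version B (the rewrite author's own statement) =====
-- stated objective: faster
-- what changed: Replaced the per-day/per-week summation loops with a closed-form arithmetic formula (partial-week sum plus triangular-number sum of full weeks).
import Mathlib
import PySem

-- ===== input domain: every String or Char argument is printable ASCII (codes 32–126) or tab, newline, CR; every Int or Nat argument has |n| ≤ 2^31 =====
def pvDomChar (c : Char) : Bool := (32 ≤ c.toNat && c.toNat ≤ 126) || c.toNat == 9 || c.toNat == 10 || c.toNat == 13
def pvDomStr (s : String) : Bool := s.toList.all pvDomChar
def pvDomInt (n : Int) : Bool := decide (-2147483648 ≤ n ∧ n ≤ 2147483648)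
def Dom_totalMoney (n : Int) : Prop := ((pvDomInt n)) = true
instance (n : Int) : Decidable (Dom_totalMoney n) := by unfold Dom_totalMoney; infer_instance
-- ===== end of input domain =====

-- B replaces A's per-day/per-week summation loops by a closed-form arithmetic formula (O(1) instead of O(n)).

-- ===== PORT A =====
-- the while loop of A: state (st, end, sm); each pass adds sum(range(st,end+1)) to sm
def totalMoneyLoop (k st end_ sm : Int) : Int :=
  if st ≤ k then
    totalMoneyLoop k (st + 1) (end_ + 1) ((PySem.List.pyRange st (end_ + 1) 1).foldl (· + ·) sm)
  else sm
termination_by (k + 1 - st).toNat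
decreasing_by omega

def totalMoney (n : Int) : Int :=
  let k := PySem.Int.floordiv n 7
  let m := PySem.Int.mod n 7
  let sm := (PySem.List.pyRange (k + 1) (k + m + 1) 1).foldl (· + ·) 0
  totalMoneyLoop k 1 7 sm

-- ===== PORT B =====
def totalMoney_alt (n : Int) : Int :=
  let k := PySem.Int.floordiv n 7
  let m := PySem.Int.mod n 7
  let part := m * k + PySem.Int.floordiv (m * (m + 1)) 2
  let full := if k > 0 then PySem.Int.floordiv (7 * k * (k + 1)) 2 + 21 * k else 0
  part + full

-- ===== PRECONDITION & SPEC =====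
def Spec_totalMoney (n : Int) (out : Int) : Prop := out = totalMoney_alt n
instance (n : Int) (out : Int) : Decidable (Spec_totalMoney n out) := by unfold Spec_totalMoney; infer_instance

-- ===== CLAIM (what is proved, stated in full; the proofs are below) =====
def Claim_equal_totalMoney : Prop := ∀ (n : Int), Dom_totalMoney n → Spec_totalMoney n (totalMoney n)

-- ===== LEMMAS AND PROOFS =====

-- sum of a 7-element range starting at st
lemma sum7 (st sm : Int) :
    (PySem.List.pyRange st (st + 7) 1).foldl (· + ·) sm = sm + 7 * st + 21 := by
  rw [PySem.List.pyRange_one]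
  have h : (st + 7 - st).toNat = 7 := by omega
  rw [h]
  simp [List.range_succ, List.foldl]
  ring

-- A's while loop, doubled to avoid division: it adds 7t+21 for each t in [st, k]
lemma loop2 : ∀ (j : Nat) (k st sm : Int), (k + 1 - st).toNat = j → st ≤ k + 1 →
    2 * (totalMoneyLoop k st (st + 6) sm - sm)
      = 7 * (k * (k + 1) - st * (st - 1)) + 42 * (k + 1 - st) := by
  intro j
  induction j with
  | zero =>
    intro k st sm hj hle
    have hst : st = k + 1 := by omega
    rw [totalMoneyLoop]
    simp only [show ¬ st ≤ k by omega, if_false]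
    subst hst; ring
  | succ j ih =>
    intro k st sm hj hle
    have hst : st ≤ k := by omega
    rw [totalMoneyLoop]
    simp only [hst, if_true]
    have h7 : st + 6 + 1 = st + 7 := by ring
    rw [h7, sum7]
    have h6 : st + 7 = (st + 1) + 6 := by ring
    rw [h6]
    have := ih k (st + 1) (sm + 7 * st + 21) (by omega) (by omega)
    linarith

-- the partial-week sum (m fixed in [0,6]) equals B's closed form
lemma partial_sum (k m : Int) (hm0 : 0 ≤ m) (hm6 : m < 7) :
    (PySem.List.pyRange (k + 1) (k + m + 1) 1).foldl (· + ·) 0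
      = m * k + PySem.Int.floordiv (m * (m + 1)) 2 := by
  rw [PySem.List.pyRange_one]
  have h : k + m + 1 - (k + 1) = m := by ring
  rw [h]
  interval_cases m <;>
    simp [List.range_succ, List.foldl, PySem.Int.floordiv] <;> ring

-- ===== VERDICT (by name: the statement is the Claim_ definition above) =====
theorem totalMoney_spec : Claim_equal_totalMoney := by
  intro n _
  unfold Spec_totalMoney totalMoney totalMoney_alt
  set k := PySem.Int.floordiv n 7 with hk
  set m := PySem.Int.mod n 7 with hm
  have hm0 : 0 ≤ m := PySem.Int.mod_nonneg n (by norm_num)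
  have hm7 : m < 7 := PySem.Int.mod_lt n (by norm_num)
  simp only
  rw [partial_sum k m hm0 hm7]
  set P := m * k + PySem.Int.floordiv (m * (m + 1)) 2 with hP
  by_cases hkpos : k > 0
  · simp only [hkpos, if_true]
    have h2 := loop2 (k + 1 - 1).toNat k 1 P rfl (by omega)
    norm_num at h2
    -- B's full-weeks term: the floordiv is exact since k*(k+1) is even
    obtain ⟨c, hc⟩ : (2 : Int) ∣ 7 * k * (k + 1) := by
      rcases Int.even_mul_succ_self k with ⟨c, hc⟩
      exact ⟨7 * c, by rw [mul_assoc, hc]; ring⟩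
    have hfd : PySem.Int.floordiv (7 * k * (k + 1)) 2 = c := by
      simp [PySem.Int.floordiv, hc, Int.mul_fdiv_cancel_left]
    rw [hfd]
    have : 7 * k * (k + 1) = 2 * c := hc
    linarith
  · simp only [hkpos, if_false]
    rw [totalMoneyLoop]
    simp only [show ¬ (1 : Int) ≤ k by omega, if_false]
    ring
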